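-- pv_equiv track=rewrite | github.com/KaBarbi/Poker-Hand-Analyzer | hand_ev.py | get_flush_values
-- ===== SOURCE A (Python) =====
-- from collections import Counter, defaultdict
--
-- def get_flush_values(cards):
--     suits = defaultdict(list)
--
--     for value, suit in cards:
--         suits[suit].append(value)
--
--     for values in suits.values():
--         if len(values) >= 5:
--             return sorted(values, reverse=True)[:5]
--
--     return None
-- ===== SOURCE B (Python) =====
-- def get_flush_values(cards):
--     # Brute force, no grouping structure: the first card whose suit occurs
--     # at least 5 times in the hand identifies the flush suit.
--     for _, s in cards:
--         if sum(1 for _, t in cards if t == s) >= 5: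
--             return sorted((v for v, t in cards if t == s), reverse=True)[:5]
--     return None
-- ===== Notes on version B (the rewrite author's own statement) =====
-- stated objective: simpler
-- what changed: Drops the defaultdict grouping entirely: B scans the cards and for each card counts its suit's occurrences by a direct inner scan (quadratic brute force), the first card whose suit reaches 5 identifying the flush suit, whose values are then gathered by one filtered pass and sorted.
import Mathlib
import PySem

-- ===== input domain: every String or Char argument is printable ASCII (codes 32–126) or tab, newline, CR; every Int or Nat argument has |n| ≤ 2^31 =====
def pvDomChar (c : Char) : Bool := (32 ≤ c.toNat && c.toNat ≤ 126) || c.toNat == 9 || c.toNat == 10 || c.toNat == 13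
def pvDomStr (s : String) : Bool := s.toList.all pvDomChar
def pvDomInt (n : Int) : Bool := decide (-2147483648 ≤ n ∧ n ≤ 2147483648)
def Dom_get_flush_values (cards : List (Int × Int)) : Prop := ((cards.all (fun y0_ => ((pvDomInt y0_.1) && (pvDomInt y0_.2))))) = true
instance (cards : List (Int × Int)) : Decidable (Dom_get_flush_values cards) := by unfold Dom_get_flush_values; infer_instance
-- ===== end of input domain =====

-- B drops A's defaultdict grouping: a quadratic brute-force scan counts each card's suit
-- by an inner scan, the first card whose suit reaches 5 identifying the flush suit; objective: simpler.

-- ===== PORT A =====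
-- the 'for values in suits.values(): if len(values) >= 5: return sorted(values, reverse=True)[:5]' loop
def aGo : List (List Int) → Option (List Int)
  | [] => none
  | vs :: rest =>
    if 5 ≤ vs.length then
      some (PySem.List.slice (PySem.List.sorted vs (fun x => x) true) none (some 5))
    else aGo rest

def get_flush_values (cards : List (Int × Int)) : Option (List Int) :=
  let suits := cards.foldl (fun d p => d.modify p.2 ([] : List Int) (fun l => l ++ [p.1])) PySem.Dict.empty
  aGo suits.values

-- ===== PORT B =====
-- the 'for _, s in cards: if sum(1 for _, t in cards if t == s) >= 5: return …' loop;
-- 'sum(1 for _, t in cards if t == s)' is the number of pairs whose suit equals s = countP (exact)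
def bGo (cards : List (Int × Int)) : List (Int × Int) → Option (List Int)
  | [] => none
  | (_, s) :: rest =>
    if 5 ≤ ((cards.countP (fun p => p.2 == s) : Int)) then
      some (PySem.List.slice
        (PySem.List.sorted ((cards.filter (fun p => p.2 == s)).map (fun p => p.1)) (fun x => x) true)
        none (some 5))
    else bGo cards rest

def get_flush_values_alt (cards : List (Int × Int)) : Option (List Int) :=
  bGo cards cards

-- ===== PRECONDITION & SPEC =====
def Spec_get_flush_values (cards : List (Int × Int)) (out : Option (List Int)) : Prop := out = get_flush_values_alt cards
instance (cards : List (Int × Int)) (out : Option (List Int)) : Decidable (Spec_get_flush_values cards out) := by unfold Spec_get_flush_values; infer_instance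

-- ===== CLAIM (what is proved, stated in full; the proofs are below) =====
def Claim_equal_get_flush_values : Prop := ∀ (cards : List (Int × Int)), Dom_get_flush_values cards → Spec_get_flush_values cards (get_flush_values cards)

-- ===== LEMMAS AND PROOFS =====

-- proof-side view: iterate over a list of candidate suits, firing on the first with ≥5 cards
def keyHit (cards : List (Int × Int)) : List Int → Option (List Int)
  | [] => none
  | k :: rest =>
    if 5 ≤ ((cards.filter (fun p => p.2 == k)).map (fun p : Int × Int => p.1)).length then
      some (PySem.List.slice
        (PySem.List.sorted ((cards.filter (fun p => p.2 == k)).map (fun p => p.1)) (fun x => x) true)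
        none (some 5))
    else keyHit cards rest

-- A's grouping fold, looked up at any key, is the filtered projection of the processed list
theorem grp_getD (l : List (Int × Int)) (d : PySem.Dict Int (List Int)) (k : Int) :
    (l.foldl (fun d p => d.modify p.2 ([] : List Int) (fun l => l ++ [p.1])) d).getD k [] =
      d.getD k [] ++ (l.filter (fun p => p.2 == k)).map (fun p => p.1) := by
  induction l generalizing d with
  | nil => simp
  | cons p t ih =>
    simp only [List.foldl_cons, ih, List.filter_cons]
    rw [PySem.Dict.getD_modify]
    by_cases h : k = p.2
    · subst h; simp
    · simp [h, Ne.symm h]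

-- A's loop over the grouped value lists is keyHit over the key list
theorem aGo_eq_keyHit (cards : List (Int × Int)) (ks : List Int) :
    aGo (ks.map (fun k => (cards.filter (fun p => p.2 == k)).map (fun p => p.1))) =
      keyHit cards ks := by
  induction ks with
  | nil => rfl
  | cons k t ih => simp only [List.map_cons, aGo, keyHit, ih]

-- B's loop over the cards is keyHit over the full suit list
theorem bGo_eq_keyHit (cards : List (Int × Int)) (l : List (Int × Int)) :
    bGo cards l = keyHit cards (l.map (fun p => p.2)) := by
  induction l with
  | nil => rfl
  | cons p t ih =>
    obtain ⟨v, s⟩ := p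
    simp only [List.map_cons, bGo, keyHit, ih]
    have hc : ((cards.countP (fun p => p.2 == s) : Int)) =
        (((cards.filter (fun p => p.2 == s)).map (fun p : Int × Int => p.1)).length : Int) := by
      simp [List.countP_eq_length_filter]
    rw [hc]
    by_cases h : 5 ≤ ((cards.filter (fun p => p.2 == s)).map (fun p : Int × Int => p.1)).length
    · rw [if_pos (by exact_mod_cast h), if_pos h]
    · rw [if_neg (fun h' => h (by exact_mod_cast h')), if_neg h]

-- keyHit is find?-then-map
theorem keyHit_eq_find (cards : List (Int × Int)) (ks : List Int) :
    keyHit cards ks =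
      (ks.find? (fun k =>
        5 ≤ (cards.filter (fun p => p.2 == k)).length)).map
        (fun k => PySem.List.slice
          (PySem.List.sorted ((cards.filter (fun p => p.2 == k)).map (fun p => p.1)) (fun x => x) true)
          none (some 5)) := by
  induction ks with
  | nil => rfl
  | cons k t ih =>
    simp only [keyHit, List.find?_cons, List.length_map]
    by_cases h : 5 ≤ (cards.filter (fun p => p.2 == k)).length
    · simp [h]
    · simp [h, ih]

-- find? over the set-of-first-occurrences of a list equals find? over the list itself
theorem find_foldl_add (p : Int → Bool) (l : List Int) :
    ∀ s : PySem.Set Int, (l.foldl PySem.Set.add s).find? p = (s.find? p).or (l.find? p) := by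
  induction l with
  | nil => intro s; simp
  | cons a t ih =>
    intro s
    simp only [List.foldl_cons, List.find?_cons]
    rw [ih]
    unfold PySem.Set.add
    by_cases hm : PySem.Set.contains s a = true
    · rw [if_pos hm]
      by_cases hp : p a = true
      · have hsome : (s.find? p).isSome := by
          rw [List.find?_isSome]
          exact ⟨a, by simpa [PySem.Set.contains] using hm, hp⟩
        obtain ⟨x, hx⟩ := Option.isSome_iff_exists.mp hsome
        simp [hp, hx]
      · simp [hp]
    · rw [if_neg hm, List.find?_append]
      by_cases hp : p a = true
      · cases hfind : s.find? p <;> simp [hp]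
      · simp [hp]

theorem find_ofList (p : Int → Bool) (l : List Int) :
    (PySem.Set.ofList l).find? p = l.find? p := by
  rw [PySem.Set.ofList_eq_foldl, find_foldl_add]
  simp

-- ===== VERDICT =====
theorem get_flush_values_spec : Claim_equal_get_flush_values := by
  intro cards _
  unfold Spec_get_flush_values get_flush_values get_flush_values_alt
  show aGo (cards.foldl (fun d p => d.modify p.2 ([] : List Int) (fun l => l ++ [p.1]))
      PySem.Dict.empty).values = bGo cards cards
  have hnd : (cards.foldl (fun d p => d.modify p.2 ([] : List Int) (fun l => l ++ [p.1]))
      PySem.Dict.empty).keys.Nodup :=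
    PySem.Dict.nodup_keys_foldl_modify_key cards (fun p => p.2) [] (fun _ p l => l ++ [p.1])
      PySem.Dict.empty (by simp)
  have hkeys : (cards.foldl (fun d p => d.modify p.2 ([] : List Int) (fun l => l ++ [p.1]))
      PySem.Dict.empty).keys = PySem.Set.ofList (cards.map (fun p => p.2)) := by
    rw [PySem.Dict.keys_foldl_modify_key cards (fun p => p.2) [] (fun _ p l => l ++ [p.1])]
    simp [PySem.Dict.keys_empty, PySem.Set.update_nil_left]
  rw [PySem.Dict.values_eq_map_keys _ hnd [], hkeys]
  have hfv : (PySem.Set.ofList (cards.map (fun p => p.2))).map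
      (fun k => (cards.foldl (fun d p => d.modify p.2 ([] : List Int) (fun l => l ++ [p.1]))
        PySem.Dict.empty).getD k []) =
      (PySem.Set.ofList (cards.map (fun p => p.2))).map
      (fun k => (cards.filter (fun p => p.2 == k)).map (fun p => p.1)) := by
    apply List.map_congr_left; intro k _
    rw [grp_getD]; simp
  rw [hfv, aGo_eq_keyHit, keyHit_eq_find, find_ofList, ← keyHit_eq_find, ← bGo_eq_keyHit]
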